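-- pv_equiv track=rewrite | github.com/GdDev00/PythonWorkbook | Part Eight/183/183.py | find_next_element
-- ===== SOURCE A (Python) =====
-- def find_next_element(last_word, element_list):
--     last_char = last_word[-1]
--     for i in range(len(element_list)):
--         if element_list[i][0] == last_char:
--             new_element = element_list.pop(i)
--             result = new_element + ", "
--             return result + find_next_element(str(new_element), element_list)
--
--     return ""
-- ===== SOURCE B (Python) =====
-- def find_next_element(last_word, element_list):
--     # Index elements by first character into FIFO queues, then follow the
--     # chain popping from the front; O(n) instead of A's repeated O(n) scans.
--     # Unlike A, this does not mutate element_list.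
--     queues = {}
--     for w in element_list:
--         queues.setdefault(w[0], []).append(w)
--     result = ""
--     c = last_word[-1]
--     q = queues.get(c)
--     while q:
--         w = q.pop(0)
--         result += w + ", "
--         c = w[-1]
--         q = queues.get(c)
--     return result
-- ===== Notes on version B (the rewrite author's own statement) =====
-- stated objective: faster
-- what changed: B indexes the elements once into per-first-character FIFO queues (a dict) and follows the chain by popping queue fronts in a single loop, instead of A's recursion that rescans and pops the remaining list at every step; B also does not mutate element_list.
import Mathlib
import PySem

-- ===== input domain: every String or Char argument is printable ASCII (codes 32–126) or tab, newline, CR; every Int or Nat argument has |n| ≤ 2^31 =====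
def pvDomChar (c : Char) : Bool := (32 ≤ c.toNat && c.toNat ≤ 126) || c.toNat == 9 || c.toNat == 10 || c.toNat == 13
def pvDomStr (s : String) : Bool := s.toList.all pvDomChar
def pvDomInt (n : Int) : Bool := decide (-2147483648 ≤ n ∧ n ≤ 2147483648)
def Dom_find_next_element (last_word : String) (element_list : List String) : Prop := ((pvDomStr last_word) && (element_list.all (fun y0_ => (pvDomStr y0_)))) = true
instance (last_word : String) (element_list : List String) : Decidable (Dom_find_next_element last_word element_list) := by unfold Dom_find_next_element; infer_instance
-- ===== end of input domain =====

-- B builds per-first-character FIFO queues once and follows the chain popping queue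
-- fronts, instead of A's rescan of the list at every step; A pops matched elements
-- from element_list in place, B leaves it untouched — the equivalence proved here is
-- about the return value only.

-- ===== PORT A =====
-- A's for-i/pop loop: first element whose first char equals c, plus the list with it removed
def scanA (c : Char) : List String → Option (String × List String)
  | [] => none
  | w :: ws =>
    if PySem.Str.pyGet? w 0 == some c then some (w, ws)
    else match scanA c ws with
      | none => none
      | some (v, r) => some (v, w :: r)

-- termination measure for find_next_element (cited by its decreasing_by)
theorem scanA_length {c : Char} : ∀ {el : List String} {w : String} {rest : List String},
    scanA c el = some (w, rest) → rest.length < el.length := by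
  intro el
  induction el with
  | nil => intro w rest h; simp [scanA] at h
  | cons x xs ih =>
    intro w rest h
    simp only [scanA] at h
    split at h
    · cases h; simp
    · cases hs : scanA c xs with
      | none => rw [hs] at h; cases h
      | some p =>
        rw [hs] at h
        cases p with
        | mk v r =>
          cases h
          have := ih hs
          simpa using Nat.succ_lt_succ this

def find_next_element (last_word : String) (element_list : List String) : String :=
  match PySem.Str.pyGet? last_word (-1) with
  | none => ""                           -- Python: IndexError on empty last_word (outside Pre_)
  | some c =>
    match h : scanA c element_list with
    | none => ""
    | some (w, rest) => (w ++ ", ") ++ find_next_element w rest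
termination_by element_list.length
decreasing_by exact scanA_length h

-- ===== PORT B =====
-- queues.setdefault(w[0], []).append(w) over the list
def buildQueues (element_list : List String) : PySem.Dict Char (List String) :=
  element_list.foldl (fun d w =>
    match PySem.Str.pyGet? w 0 with
    | some c => d.insert c (d.getD c [] ++ [w])
    | none => d)                         -- Python: IndexError on "" (outside Pre_)
    PySem.Dict.empty

-- the while loop: pop the front of queue c, append to the result, continue with w[-1]
def chainLoop : Nat → Char → PySem.Dict Char (List String) → String → String
  | 0, _, _, acc => acc
  | fuel + 1, c, d, acc =>
    match d.getD c [] with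
    | [] => acc
    | w :: ws =>
      match PySem.Str.pyGet? w (-1) with
      | none => acc                      -- unreachable: queued strings are nonempty under Pre_
      | some c' => chainLoop fuel c' (d.insert c ws) (acc ++ (w ++ ", "))

def find_next_element_alt (last_word : String) (element_list : List String) : String :=
  let d := buildQueues element_list
  match PySem.Str.pyGet? last_word (-1) with
  | none => ""                           -- Python: IndexError on empty last_word (outside Pre_)
  | some c => chainLoop element_list.length c d ""

-- ===== PRECONDITION & SPEC =====
-- Pre_ excludes exactly the inputs where A raises IndexError: an empty last_word
-- (last_word[-1]), and any list containing "" (A's scans never pop "" and always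
-- reach it, so ""[0] raises on every path).
def Pre_find_next_element (last_word : String) (element_list : List String) : Prop :=
  last_word ≠ "" ∧ "" ∉ element_list
instance (last_word : String) (element_list : List String) : Decidable (Pre_find_next_element last_word element_list) := by unfold Pre_find_next_element; infer_instance

def pvWitness_find_next_element : String × List String := ("a", ["ab", "bc", "ca"])

def Spec_find_next_element (last_word : String) (element_list : List String) (out : String) : Prop := out = find_next_element_alt last_word element_list
instance (last_word : String) (element_list : List String) (out : String) : Decidable (Spec_find_next_element last_word element_list out) := by unfold Spec_find_next_element; infer_instance

-- ===== CLAIM (what is proved, stated in full; the proofs are below) =====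
def Claim_equal_find_next_element : Prop := ∀ (last_word : String) (element_list : List String), Dom_find_next_element last_word element_list → Pre_find_next_element last_word element_list → Spec_find_next_element last_word element_list (find_next_element last_word element_list)

-- ===== LEMMAS AND PROOFS =====

theorem getLast?_exists {α : Type} : ∀ (a : α) (t : List α), ∃ c, (a :: t).getLast? = some c := by
  intro a t
  induction t generalizing a with
  | nil => exact ⟨a, rfl⟩
  | cons b t ih =>
    obtain ⟨c, hc⟩ := ih b
    exact ⟨c, by rw [List.getLast?_cons_cons]; exact hc⟩

theorem pyGet0_ne (s : String) (h : s ≠ "") : ∃ c, PySem.Str.pyGet? s 0 = some c := by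
  rw [PySem.Str.pyGet?_eq, PySem.Chars.pyGet?_eq_listPyGet?, PySem.List.pyGet?_zero]
  cases hl : s.toList with
  | nil => exact absurd (String.toList_eq_nil_iff.mp hl) h
  | cons a t => exact ⟨a, rfl⟩

theorem pyGetLast_ne (s : String) (h : s ≠ "") : ∃ c, PySem.Str.pyGet? s (-1) = some c := by
  rw [PySem.Str.pyGet?_eq, PySem.Chars.pyGet?_eq_listPyGet?, PySem.List.pyGet?_neg_one]
  cases hl : s.toList with
  | nil => exact absurd (String.toList_eq_nil_iff.mp hl) h
  | cons a t => exact getLast?_exists a t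

theorem ne_empty_of_pyGet0 {w : String} {c : Char} (h : PySem.Str.pyGet? w 0 = some c) : w ≠ "" := by
  intro he
  subst he
  rw [PySem.Str.pyGet?_eq, PySem.Chars.pyGet?_eq_listPyGet?, PySem.List.pyGet?_zero] at h
  simp at h

theorem scanA_cons_pos {c : Char} {x : String} {xs : List String}
    (hx : (PySem.Str.pyGet? x 0 == some c) = true) : scanA c (x :: xs) = some (x, xs) := by
  unfold scanA
  rw [if_pos hx]

theorem scanA_cons_neg {c : Char} {x : String} {xs : List String}
    (hx : ¬ (PySem.Str.pyGet? x 0 == some c) = true) :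
    scanA c (x :: xs) = match scanA c xs with
      | none => none
      | some (v, r) => some (v, x :: r) := by
  simp only [scanA]
  rw [if_neg hx]

theorem filter_head_pos {c : Char} {x : String} (xs : List String)
    (hx : (PySem.Str.pyGet? x 0 == some c) = true) :
    (x :: xs).filter (fun v => PySem.Str.pyGet? v 0 == some c)
      = x :: xs.filter (fun v => PySem.Str.pyGet? v 0 == some c) := by
  rw [List.filter_cons]
  simp only [hx]
  rfl

theorem filter_head_neg {c : Char} {x : String} (xs : List String)
    (hx : (PySem.Str.pyGet? x 0 == some c) = false) :
    (x :: xs).filter (fun v => PySem.Str.pyGet? v 0 == some c)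
      = xs.filter (fun v => PySem.Str.pyGet? v 0 == some c) := by
  rw [List.filter_cons]
  simp only [hx]
  rfl

-- one induction characterising A's scan by the per-character filters B's queues hold
theorem scanA_cases (c : Char) : ∀ (el : List String),
    (scanA c el = none ∧ el.filter (fun v => PySem.Str.pyGet? v 0 == some c) = []) ∨
    (∃ w rest, scanA c el = some (w, rest) ∧
      PySem.Str.pyGet? w 0 = some c ∧
      el.filter (fun v => PySem.Str.pyGet? v 0 == some c)
        = w :: rest.filter (fun v => PySem.Str.pyGet? v 0 == some c) ∧
      (∀ c', c' ≠ c → rest.filter (fun v => PySem.Str.pyGet? v 0 == some c')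
        = el.filter (fun v => PySem.Str.pyGet? v 0 == some c')) ∧
      rest ⊆ el) := by
  intro el
  induction el with
  | nil => left; simp [scanA]
  | cons x xs ih =>
    by_cases hx : (PySem.Str.pyGet? x 0 == some c) = true
    · right
      refine ⟨x, xs, scanA_cons_pos hx, eq_of_beq hx, filter_head_pos xs hx, ?_,
        List.subset_cons_self _ _⟩
      intro c' hc'
      have hx' : (PySem.Str.pyGet? x 0 == some c') = false := by
        rw [eq_of_beq hx]
        exact beq_eq_false_iff_ne.mpr (fun h => hc' (Option.some.inj h).symm)
      rw [filter_head_neg xs hx']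
    · have hxf : (PySem.Str.pyGet? x 0 == some c) = false := Bool.eq_false_iff.mpr hx
      rcases ih with ⟨h1, h2⟩ | ⟨w, rest, hs, hw, hf, hne, hsub⟩
      · left
        constructor
        · rw [scanA_cons_neg hx, h1]
        · rw [filter_head_neg xs hxf, h2]
      · right
        refine ⟨w, x :: rest, ?_, hw, ?_, ?_, List.cons_subset_cons x hsub⟩
        · rw [scanA_cons_neg hx, hs]
        · rw [filter_head_neg xs hxf, filter_head_neg rest hxf, hf]
        · intro c' hc'
          by_cases hxc : (PySem.Str.pyGet? x 0 == some c') = true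
          · rw [filter_head_pos rest hxc, filter_head_pos xs hxc, hne c' hc']
          · have hxcf : (PySem.Str.pyGet? x 0 == some c') = false := Bool.eq_false_iff.mpr hxc
            rw [filter_head_neg rest hxcf, filter_head_neg xs hxcf, hne c' hc']

-- the queues B builds hold exactly the per-first-character filters of the list
theorem build_inv : ∀ (el : List String) (d : PySem.Dict Char (List String)), "" ∉ el →
    ∀ ch, (el.foldl (fun d w =>
        match PySem.Str.pyGet? w 0 with
        | some c => d.insert c (d.getD c [] ++ [w])
        | none => d) d).getD ch []
      = d.getD ch [] ++ el.filter (fun v => PySem.Str.pyGet? v 0 == some ch) := by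
  intro el
  induction el with
  | nil => intro d _ ch; simp
  | cons w ws ih =>
    intro d hmem ch
    have hw : w ≠ "" := fun he => hmem (by simp [he])
    obtain ⟨c0, h0⟩ := pyGet0_ne w hw
    have hws : "" ∉ ws := fun hm => hmem (List.mem_cons_of_mem _ hm)
    simp only [List.foldl_cons, h0]
    rw [ih _ hws ch]
    by_cases hc : ch = c0
    · subst hc
      have hbq : (PySem.Str.pyGet? w 0 == some ch) = true := by
        rw [h0]
        exact beq_self_eq_true _
      rw [PySem.Dict.getD_insert_self, filter_head_pos ws hbq, List.append_assoc,
          List.singleton_append]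
    · have hne' : (PySem.Str.pyGet? w 0 == some ch) = false := by
        rw [h0]
        exact beq_eq_false_iff_ne.mpr (fun h => hc (Option.some.inj h).symm)
      rw [PySem.Dict.getD_insert_of_ne _ _ _ hc, filter_head_neg ws hne']

-- main loop invariant: B's walk over the queues retraces A's recursion
theorem chain_main : ∀ (fuel : Nat) (el : List String) (lw : String) (c : Char)
    (d : PySem.Dict Char (List String)) (acc : String),
    "" ∉ el → el.length ≤ fuel →
    PySem.Str.pyGet? lw (-1) = some c →
    (∀ ch, d.getD ch [] = el.filter (fun v => PySem.Str.pyGet? v 0 == some ch)) →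
    chainLoop fuel c d acc = acc ++ find_next_element lw el := by
  intro fuel
  induction fuel with
  | zero =>
    intro el lw c d acc hmem hlen hlw hinv
    have hel : el = [] := by
      cases el with
      | nil => rfl
      | cons a t => simp at hlen
    subst hel
    have hA : find_next_element lw [] = "" := by
      unfold find_next_element
      rw [hlw]
      split
      · rename_i heq; cases heq
      · rename_i heq
        cases heq
        split
        · rfl
        · rename_i heq2; simp [scanA] at heq2
    rw [hA, String.append_empty]
    rfl
  | succ n ih =>
    intro el lw c d acc hmem hlen hlw hinv
    rcases scanA_cases c el with ⟨hs, hf⟩ | ⟨w, rest, hs, hw0, hf, hne, hsub⟩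
    · have hq : d.getD c [] = [] := by rw [hinv c, hf]
      have hA : find_next_element lw el = "" := by
        unfold find_next_element
        rw [hlw]
        split
        · rename_i heq; cases heq
        · rename_i heq
          cases heq
          split
          · rfl
          · rename_i heq2; rw [hs] at heq2; cases heq2
      rw [hA, String.append_empty]
      simp only [chainLoop, hq]
    · have hw : w ≠ "" := ne_empty_of_pyGet0 hw0
      obtain ⟨c', hc'⟩ := pyGetLast_ne w hw
      have hq : d.getD c []
          = w :: rest.filter (fun v => PySem.Str.pyGet? v 0 == some c) := by
        rw [hinv c, hf]
      have hstep : chainLoop (n + 1) c d acc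
          = chainLoop n c' (d.insert c (rest.filter (fun v => PySem.Str.pyGet? v 0 == some c)))
              (acc ++ (w ++ ", ")) := by
        simp only [chainLoop, hq, hc']
      have hinv' : ∀ ch,
          (d.insert c (rest.filter (fun v => PySem.Str.pyGet? v 0 == some c))).getD ch []
            = rest.filter (fun v => PySem.Str.pyGet? v 0 == some ch) := by
        intro ch
        by_cases hch : ch = c
        · subst hch
          rw [PySem.Dict.getD_insert_self]
        · rw [PySem.Dict.getD_insert_of_ne _ _ _ hch, hinv ch, hne ch hch]
      have hmem' : "" ∉ rest := fun hm => hmem (hsub hm)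
      have hlen' : rest.length ≤ n := by
        have := scanA_length hs
        omega
      have hA : find_next_element lw el = (w ++ ", ") ++ find_next_element w rest := by
        conv_lhs => rw [find_next_element.eq_def]
        rw [hlw]
        split
        · rename_i heq; cases heq
        · rename_i heq
          cases heq
          split
          · rename_i heq2; rw [hs] at heq2; cases heq2
          · rename_i heq2
            rw [hs] at heq2
            cases heq2
            rfl
      rw [hstep, ih rest w c' _ _ hmem' hlen' hc' hinv', hA, String.append_assoc]

-- ===== VERDICT (by name: the statement is the Claim_ definition above) =====
theorem find_next_element_spec : Claim_equal_find_next_element := by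
  intro lw el _ hpre
  obtain ⟨hlw, hel⟩ := hpre
  obtain ⟨c, hc⟩ := pyGetLast_ne lw hlw
  unfold Spec_find_next_element
  have halt : find_next_element_alt lw el = chainLoop el.length c (buildQueues el) "" := by
    unfold find_next_element_alt
    rw [hc]
  rw [halt]
  have hinv : ∀ ch, (buildQueues el).getD ch []
      = el.filter (fun v => PySem.Str.pyGet? v 0 == some ch) := by
    intro ch
    unfold buildQueues
    rw [build_inv el PySem.Dict.empty hel ch]
    rfl
  rw [chain_main el.length el lw c (buildQueues el) "" hel (le_refl _) hc hinv,
      String.empty_append]
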